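-- pv_equiv track=rewrite | github.com/infomuscle/algorithms-programmers | line-2020-python/line-2020-2.py | getCheatingRate
-- ===== SOURCE A (Python) =====
-- def getCheatingRate(answer, sheet1, sheet2):
--     suspicion = 0
--     suspicionLength = 0
--     longestSuspicion = 0
--
--     for i in range(len(answer)):
--         if answer[i] != sheet1[i] and sheet1[i] == sheet2[i]:
--             suspicion += 1
--             suspicionLength += 1
--         else:
--             if suspicionLength > longestSuspicion:
--                 longestSuspicion = suspicionLength
--             suspicionLength = 0
--
--     if suspicionLength > longestSuspicion:
--         longestSuspicion = suspicionLength
--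
--     return suspicion + (longestSuspicion*longestSuspicion)
-- ===== SOURCE B (Python) =====
-- def getCheatingRate(answer, sheet1, sheet2):
--     def suspicious(t):
--         a, b, c = t
--         return a != b and b == c
--
--     triples = list(zip(answer, sheet1, sheet2))
--     n = len(triples)
--     count = 0
--     longest = 0
--     i = 0
--     while i < n:
--         if not suspicious(triples[i]):
--             i += 1
--             continue
--         j = i
--         while j < n and suspicious(triples[j]):
--             j += 1
--         count += j - i
--         longest = max(longest, j - i)
--         i = j
--     return count + longest * longest
-- ===== Notes on version B (the rewrite author's own statement) =====
-- stated objective: alternative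
-- what changed: B zips the three lists into triples and runs a two-pointer run-splitting sweep (find each maximal suspicious run, add its length to the count, take the max of run lengths), replacing A's indexed scan with a pending-run counter and a post-loop flush.
import Mathlib
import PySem

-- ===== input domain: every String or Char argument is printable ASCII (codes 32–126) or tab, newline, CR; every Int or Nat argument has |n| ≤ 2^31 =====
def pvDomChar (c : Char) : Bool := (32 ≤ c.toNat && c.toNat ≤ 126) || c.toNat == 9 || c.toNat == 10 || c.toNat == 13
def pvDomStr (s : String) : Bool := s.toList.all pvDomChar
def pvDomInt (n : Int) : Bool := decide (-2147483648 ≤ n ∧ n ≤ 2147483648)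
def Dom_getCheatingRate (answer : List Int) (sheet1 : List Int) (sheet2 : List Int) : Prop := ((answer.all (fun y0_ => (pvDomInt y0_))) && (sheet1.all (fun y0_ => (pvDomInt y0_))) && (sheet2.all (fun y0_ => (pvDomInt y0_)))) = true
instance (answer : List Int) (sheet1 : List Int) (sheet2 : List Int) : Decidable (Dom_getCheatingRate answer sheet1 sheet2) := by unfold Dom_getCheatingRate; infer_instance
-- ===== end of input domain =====

-- B replaces A's single stateful scan (pending-run counter + post-loop flush) by a run-splitting
-- two-pointer sweep over the zipped triples: find each maximal suspicious run, add its length,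
-- and take the max of the run lengths; same O(n) cost (objective: alternative decomposition).

-- ===== PORT A =====
-- Port of A: single loop over range(len(answer)) with state (suspicion, suspicionLength, longestSuspicion)
def getCheatingRate (answer : List Int) (sheet1 : List Int) (sheet2 : List Int) : Int :=
  let st := (PySem.List.pyRange 0 (answer.length : Int) 1).foldl
    (fun (st : Int × Int × Int) i =>
      if PySem.List.pyGetD answer i 0 ≠ PySem.List.pyGetD sheet1 i 0 ∧
         PySem.List.pyGetD sheet1 i 0 = PySem.List.pyGetD sheet2 i 0 then
        (st.1 + 1, st.2.1 + 1, st.2.2)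
      else
        (st.1, 0, if st.2.1 > st.2.2 then st.2.1 else st.2.2))
    (0, 0, 0)
  let longest := if st.2.1 > st.2.2 then st.2.1 else st.2.2
  st.1 + longest * longest

-- ===== PORT B =====
-- suspicious(t) of Source B
def pvSusp (t : Int × Int × Int) : Bool := decide (t.1 ≠ t.2.1 ∧ t.2.1 = t.2.2)

-- inner while of Source B: length of the leading all-suspicious prefix (j - i)
def pvRunLen : List (Int × Int × Int) → Nat
  | [] => 0
  | t :: ts => if pvSusp t then pvRunLen ts + 1 else 0

-- outer while of Source B, as recursion on the not-yet-visited suffix of the triple list: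
-- skip a non-suspicious triple, or consume a whole maximal suspicious run at once
-- (the Nat argument is pure fuel for totality; pvGo passes the list's length)
def pvGoF : Nat → List (Int × Int × Int) → Int × Int
  | 0, _ => (0, 0)
  | _ + 1, [] => (0, 0)
  | n + 1, t :: ts =>
    if pvSusp t then
      let k := pvRunLen (t :: ts)
      let p := pvGoF n ((t :: ts).drop k)
      (p.1 + (k : Int), max (k : Int) p.2)
    else pvGoF n ts

def pvGo (ts : List (Int × Int × Int)) : Int × Int := pvGoF ts.length ts

def getCheatingRate_alt (answer : List Int) (sheet1 : List Int) (sheet2 : List Int) : Int :=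
  let p := pvGo (answer.zip (sheet1.zip sheet2))
  p.1 + p.2 * p.2

-- ===== PRECONDITION & SPEC =====
-- Pre_ is exactly the set of inputs on which Python A returns: sheet1 at least as long as answer,
-- and past sheet2's end answer agrees with sheet1 (otherwise the short-circuit condition reaches
-- sheet2[i] or sheet1[i] out of range and A raises IndexError).
def Pre_getCheatingRate (answer : List Int) (sheet1 : List Int) (sheet2 : List Int) : Prop :=
  answer.length ≤ sheet1.length ∧
  ∀ i < answer.length, sheet2.length ≤ i → answer.getD i 0 = sheet1.getD i 0
instance (answer : List Int) (sheet1 : List Int) (sheet2 : List Int) : Decidable (Pre_getCheatingRate answer sheet1 sheet2) := by unfold Pre_getCheatingRate; infer_instance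
def pvWitness_getCheatingRate : List Int × List Int × List Int := ([1, 2, 3], [2, 2, 2], [2, 1, 2])

def Spec_getCheatingRate (answer : List Int) (sheet1 : List Int) (sheet2 : List Int) (out : Int) : Prop := out = getCheatingRate_alt answer sheet1 sheet2
instance (answer : List Int) (sheet1 : List Int) (sheet2 : List Int) (out : Int) : Decidable (Spec_getCheatingRate answer sheet1 sheet2 out) := by unfold Spec_getCheatingRate; infer_instance

-- ===== CLAIM (what is proved, stated in full; the proofs are below) =====
def Claim_equal_getCheatingRate : Prop := ∀ (answer : List Int) (sheet1 : List Int) (sheet2 : List Int), Dom_getCheatingRate answer sheet1 sheet2 → Pre_getCheatingRate answer sheet1 sheet2 → Spec_getCheatingRate answer sheet1 sheet2 (getCheatingRate answer sheet1 sheet2)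

-- ===== LEMMAS AND PROOFS =====

-- enough fuel makes pvGoF independent of the exact fuel value
theorem pvGoF_congr : ∀ (n m : Nat) (ts : List (Int × Int × Int)),
    ts.length ≤ n → ts.length ≤ m → pvGoF n ts = pvGoF m ts := by
  intro n
  induction n with
  | zero =>
    intro m ts hn _
    rw [List.length_eq_zero_iff.mp (Nat.le_zero.mp hn)]
    cases m <;> simp [pvGoF]
  | succ n ih =>
    intro m ts hn hm
    match ts, m with
    | [], m => cases m <;> simp [pvGoF]
    | t :: ts, m + 1 =>
      simp only [pvGoF]
      by_cases hs : pvSusp t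
      · simp only [hs, if_true]
        have hk1 : pvRunLen (t :: ts) = pvRunLen ts + 1 := by simp [pvRunLen, hs]
        have hd : ((t :: ts).drop (pvRunLen (t :: ts))).length ≤ n := by
          simp only [List.length_drop, List.length_cons]
          simp only [List.length_cons] at hn; omega
        have hd' : ((t :: ts).drop (pvRunLen (t :: ts))).length ≤ m := by
          simp only [List.length_drop, List.length_cons]
          simp only [List.length_cons] at hm; omega
        rw [ih m _ hd hd']
      · simp only [hs, Bool.false_eq_true, if_false]
        simp only [List.length_cons] at hn hm
        exact ih m ts (by omega) (by omega)

theorem pvGo_nil : pvGo [] = (0, 0) := rfl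

theorem pvGo_cons (t : Int × Int × Int) (ts : List (Int × Int × Int)) :
    pvGo (t :: ts) = if pvSusp t then
      ((pvGo ((t :: ts).drop (pvRunLen (t :: ts)))).1 + (pvRunLen (t :: ts) : Int),
        max (pvRunLen (t :: ts) : Int) (pvGo ((t :: ts).drop (pvRunLen (t :: ts)))).2)
    else pvGo ts := by
  unfold pvGo
  simp only [List.length_cons, pvGoF]
  by_cases hs : pvSusp t
  · simp only [hs, if_true]
    have hk1 : pvRunLen (t :: ts) = pvRunLen ts + 1 := by simp [pvRunLen, hs]
    rw [pvGoF_congr ts.length ((t :: ts).drop (pvRunLen (t :: ts))).length _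
      (by simp only [List.length_drop, List.length_cons]; omega) le_rfl]
  · simp [hs]

-- A's loop body as a step on booleans (the flag of position i)
def stepB (st : Int × Int × Int) (f : Bool) : Int × Int × Int :=
  if f then (st.1 + 1, st.2.1 + 1, st.2.2)
  else (st.1, 0, if st.2.1 > st.2.2 then st.2.1 else st.2.2)

theorem pvGo_nonneg : ∀ (n : Nat) (ts : List (Int × Int × Int)), ts.length ≤ n →
    0 ≤ (pvGo ts).1 ∧ 0 ≤ (pvGo ts).2 := by
  intro n
  induction n with
  | zero => intro ts h; rw [List.length_eq_zero_iff.mp (Nat.le_zero.mp h)]; simp [pvGo_nil]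
  | succ n ih =>
    intro ts h
    match ts with
    | [] => simp [pvGo_nil]
    | t :: ts =>
      rw [pvGo_cons]
      by_cases hs : pvSusp t
      · simp only [hs, if_true]
        have hlen : ((t :: ts).drop (pvRunLen (t :: ts))).length ≤ n := by
          simp [List.length_drop, pvRunLen, hs] at *; omega
        obtain ⟨h1, h2⟩ := ih _ hlen
        constructor
        · positivity
        · exact le_max_of_le_right h2
      · simp only [hs, Bool.false_eq_true, if_false]
        exact ih ts (by simp at h; omega)

theorem stepB_nonneg (st : Int × Int × Int) (f : Bool)
    (h : 0 ≤ st.1 ∧ 0 ≤ st.2.1 ∧ 0 ≤ st.2.2) :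
    0 ≤ (stepB st f).1 ∧ 0 ≤ (stepB st f).2.1 ∧ 0 ≤ (stepB st f).2.2 := by
  obtain ⟨ha, hb, hc⟩ := h
  cases f
  · simp only [stepB, Bool.false_eq_true, if_false]
    exact ⟨ha, le_rfl, by split_ifs <;> omega⟩
  · simp only [stepB, if_true]
    exact ⟨by omega, by omega, hc⟩

theorem foldB_nonneg : ∀ (L : List Bool) (st : Int × Int × Int),
    0 ≤ st.1 ∧ 0 ≤ st.2.1 ∧ 0 ≤ st.2.2 →
    0 ≤ (L.foldl stepB st).1 ∧ 0 ≤ (L.foldl stepB st).2.1 ∧ 0 ≤ (L.foldl stepB st).2.2 := by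
  intro L
  induction L with
  | nil => intro st h; simpa using h
  | cons f L ih => intro st h; exact ih _ (stepB_nonneg st f h)

-- consuming the leading suspicious run advances suspicion and the pending run by its length
theorem foldB_prefix : ∀ (ts : List (Int × Int × Int)) (s r g : Int),
    (ts.map pvSusp).foldl stepB (s, r, g)
      = ((ts.drop (pvRunLen ts)).map pvSusp).foldl stepB
          (s + (pvRunLen ts : Int), r + (pvRunLen ts : Int), g) := by
  intro ts
  induction ts with
  | nil => simp [pvRunLen]
  | cons t ts ih =>
    intro s r g
    by_cases hs : pvSusp t
    · simp only [pvRunLen, hs, if_true, List.map_cons, List.foldl_cons, List.drop_succ_cons,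
        stepB]
      rw [ih (s + 1) (r + 1) g]
      push_cast
      ring_nf
    · simp [pvRunLen, hs]

theorem drop_runLen_head_not : ∀ (ts : List (Int × Int × Int)) t' rt,
    ts.drop (pvRunLen ts) = t' :: rt → pvSusp t' = false := by
  intro ts
  induction ts with
  | nil => intro t' rt h; simp [pvRunLen] at h
  | cons t ts ih =>
    intro t' rt h
    by_cases hs : pvSusp t
    · simp only [pvRunLen, hs, if_true, List.drop_succ_cons] at h
      exact ih t' rt h
    · simp only [pvRunLen, hs, if_false, List.drop_zero] at h
      cases h; simpa using hs

-- main invariant: A's fold over the flags, started with no pending run, computes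
-- B's (count, longest) pair
theorem main_inv : ∀ (n : Nat) (ts : List (Int × Int × Int)) (s g : Int),
    ts.length ≤ n → 0 ≤ g →
    ((ts.map pvSusp).foldl stepB (s, 0, g)).1 = s + (pvGo ts).1 ∧
    max ((ts.map pvSusp).foldl stepB (s, 0, g)).2.1
        ((ts.map pvSusp).foldl stepB (s, 0, g)).2.2 = max g (pvGo ts).2 := by
  intro n
  induction n with
  | zero =>
    intro ts s g h _
    rw [List.length_eq_zero_iff.mp (Nat.le_zero.mp h)]
    simp [pvGo_nil, max_comm]
  | succ n ih =>
    intro ts s g hlen hg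
    match ts with
    | [] => simp [pvGo_nil, max_comm]
    | t :: ts =>
      by_cases hs : pvSusp t
      · -- a maximal run of length k = pvRunLen (t :: ts) ≥ 1 is consumed
        have hk1 : pvRunLen (t :: ts) = pvRunLen ts + 1 := by simp [pvRunLen, hs]
        have hfold := foldB_prefix (t :: ts) s 0 g
        rw [zero_add] at hfold
        set k := pvRunLen (t :: ts) with hk
        set rest := (t :: ts).drop k with hrest
        have hrestlen : rest.length ≤ n := by
          simp only [hrest, List.length_drop, List.length_cons]
          simp only [List.length_cons] at hlen; omega
        have hgo : pvGo (t :: ts) = ((pvGo rest).1 + (k : Int), max (k : Int) (pvGo rest).2) := by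
          simp only [hrest, hk]
          rw [pvGo_cons]; simp [hs]
        rcases hrest' : rest with _ | ⟨t', rt⟩
        · -- run reaches the end of the list
          rw [hfold, hrest', hgo, hrest']
          simp only [List.map_nil, List.foldl_nil, pvGo_nil]
          constructor
          · ring
          · simp; omega
        · -- run is followed by a non-suspicious triple, which flushes it
          have ht' : pvSusp t' = false := drop_runLen_head_not (t :: ts) t' rt (hrest ▸ hrest')
          have hrtlen : rt.length ≤ n := by
            rw [hrest'] at hrestlen; simp at hrestlen; omega
          have hmaxg : (0 : Int) ≤ max (k : Int) g := le_max_of_le_right hg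
          obtain ⟨ih1, ih2⟩ := ih rt (s + (k : Int)) (max (k : Int) g) hrtlen hmaxg
          have hstep : (rest.map pvSusp).foldl stepB (s + (k : Int), (k : Int), g)
              = (rt.map pvSusp).foldl stepB (s + (k : Int), 0, max (k : Int) g) := by
            rw [hrest']
            simp only [List.map_cons, List.foldl_cons, stepB, ht', if_false]
            have hk0 : (0 : Int) ≤ (k : Int) := Int.natCast_nonneg k
            have : (if (k : Int) > g then (k : Int) else g) = max (k : Int) g := by
              split_ifs <;> omega
            simp [this]
          have hgo' : pvGo rest = pvGo rt := by rw [hrest', pvGo_cons]; simp [ht']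
          rw [hfold, hstep, hgo]
          refine ⟨by rw [ih1]; rw [hgo']; ring, ?_⟩
          rw [ih2, hgo']
          have h2 := (pvGo_nonneg rt.length rt le_rfl).2
          omega
      · -- non-suspicious head: skipped by both
        have hgo : pvGo (t :: ts) = pvGo ts := by rw [pvGo_cons]; simp [hs]
        have hstep : ((t :: ts).map pvSusp).foldl stepB (s, 0, g)
            = (ts.map pvSusp).foldl stepB (s, 0, g) := by
          simp only [List.map_cons, List.foldl_cons, stepB, hs, Bool.false_eq_true, if_false]
          have : (if (0 : Int) > g then (0 : Int) else g) = g := by split_ifs <;> omega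
          simp [this]
        rw [hstep, hgo]
        exact ih ts s g (by simp at hlen; omega) hg

-- the flushed-out tail of positions past sheet2's end contributes nothing
theorem foldB_false_tail : ∀ (m : Nat) (s r g : Int), 0 ≤ r → 0 ≤ g →
    ((List.replicate m false).foldl stepB (s, r, g)).1 = s ∧
    max ((List.replicate m false).foldl stepB (s, r, g)).2.1
        ((List.replicate m false).foldl stepB (s, r, g)).2.2 = max r g := by
  intro m
  induction m with
  | zero => intro s r g hr hg; simp
  | succ m ih =>
    intro s r g hr hg
    simp only [List.replicate_succ, List.foldl_cons, stepB, if_false, Bool.false_eq_true]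
    have hif : (if r > g then r else g) = max r g := by split_ifs <;> omega
    rw [hif]
    obtain ⟨h1, h2⟩ := ih s 0 (max r g) le_rfl (le_max_of_le_right hg)
    exact ⟨h1, by rw [h2]; omega⟩

-- under Pre_, A's flag list is B's suspicious flags on the zipped triples followed by falses
theorem flags_decomp (answer sheet1 sheet2 : List Int)
    (h1 : answer.length ≤ sheet1.length)
    (h2 : ∀ i < answer.length, sheet2.length ≤ i → answer.getD i 0 = sheet1.getD i 0) :
    (List.range answer.length).map
        (fun i => decide (answer.getD i 0 ≠ sheet1.getD i 0 ∧ sheet1.getD i 0 = sheet2.getD i 0))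
      = (answer.zip (sheet1.zip sheet2)).map pvSusp
        ++ List.replicate (answer.length - min answer.length sheet2.length) false := by
  have hziplen : (answer.zip (sheet1.zip sheet2)).length = min answer.length sheet2.length := by
    simp [List.length_zip]; omega
  apply List.ext_getElem
  · simp [hziplen]
  · intro i hi hi'
    simp only [List.getElem_map, List.getElem_range]
    have hin : i < answer.length := by simpa using hi
    rcases lt_or_ge i (min answer.length sheet2.length) with hlt | hge
    · rw [List.getElem_append_left (by simp [hziplen]; omega)]
      simp only [List.getElem_map]
      have hz : (answer.zip (sheet1.zip sheet2))[i]'(by omega)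
          = (answer[i]'(by omega), sheet1[i]'(by omega), sheet2[i]'(by omega)) := by
        simp [List.getElem_zip]
      rw [hz]
      simp only [pvSusp]
      rw [List.getD_eq_getElem answer 0 (by omega),
          List.getD_eq_getElem sheet1 0 (by omega),
          List.getD_eq_getElem sheet2 0 (by omega)]
    · rw [List.getElem_append_right (by simp [hziplen]; omega)]
      simp only [List.getElem_replicate]
      have : sheet2.length ≤ i := by omega
      have heq := h2 i hin this
      rw [List.getD_eq_getElem answer 0 (by omega), List.getD_eq_getElem sheet1 0 (by omega)] at heq
      rw [List.getD_eq_getElem answer 0 (by omega), List.getD_eq_getElem sheet1 0 (by omega)]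
      simp [heq]

-- ===== VERDICT (by name: the statement is the Claim_ definition above) =====
theorem getCheatingRate_spec : Claim_equal_getCheatingRate := by
  intro answer sheet1 sheet2 _ hpre
  obtain ⟨h1, h2⟩ := hpre
  simp only [Spec_getCheatingRate, getCheatingRate, getCheatingRate_alt]
  -- A's fold over pyRange indices = fold of stepB over the flag list
  rw [PySem.List.pyRange_zero_natCast]
  rw [List.foldl_map]
  have hbody : ∀ (st : Int × Int × Int) (i : Nat),
      (if PySem.List.pyGetD answer (i : Int) 0 ≠ PySem.List.pyGetD sheet1 (i : Int) 0 ∧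
          PySem.List.pyGetD sheet1 (i : Int) 0 = PySem.List.pyGetD sheet2 (i : Int) 0 then
        (st.1 + 1, st.2.1 + 1, st.2.2)
      else (st.1, 0, if st.2.1 > st.2.2 then st.2.1 else st.2.2))
      = stepB st (decide (answer.getD i 0 ≠ sheet1.getD i 0 ∧ sheet1.getD i 0 = sheet2.getD i 0)) := by
    intro st i
    simp only [PySem.List.pyGetD_natCast, stepB]
    by_cases h : answer.getD i 0 ≠ sheet1.getD i 0 ∧ sheet1.getD i 0 = sheet2.getD i 0 <;>
      simp [h]
  simp only [hbody]
  rw [← List.foldl_map]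
  rw [flags_decomp answer sheet1 sheet2 h1 h2]
  rw [List.foldl_append]
  set ts := answer.zip (sheet1.zip sheet2) with hts
  set inner := (ts.map pvSusp).foldl stepB (0, 0, 0) with hinner
  set F := (List.replicate (answer.length - min answer.length sheet2.length) false).foldl
    stepB inner with hF
  obtain ⟨m1, m2⟩ := main_inv ts.length ts 0 0 le_rfl le_rfl
  have hnn := foldB_nonneg (ts.map pvSusp) (0, 0, 0) (by norm_num)
  rw [← hinner] at hnn m1 m2
  obtain ⟨f1, f2⟩ := foldB_false_tail (answer.length - min answer.length sheet2.length)
    inner.1 inner.2.1 inner.2.2 hnn.2.1 hnn.2.2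
  simp only [Prod.mk.eta, ← hF] at f1 f2
  have hgo := pvGo_nonneg ts.length ts le_rfl
  have hif : (if F.2.1 > F.2.2 then F.2.1 else F.2.2) = max F.2.1 F.2.2 := by
    split_ifs <;> omega
  rw [hif, f1, f2, m1, m2, zero_add, max_eq_right hgo.2]
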